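-- pv_equiv track=rewrite | github.com/sebastianbujwid/zsl_text_imagenet | data/graph_algorithms.py | dfs_ancestors
-- ===== SOURCE A (Python) =====
-- def dfs_ancestors(node, parents, ancestors):
--     if node in ancestors:
--         return ancestors[node]
--
--     node_ancestors = {node}
--     for p in parents[node]:
--         p_ancestors = dfs_ancestors(p, parents, ancestors)
--         node_ancestors.update(p_ancestors)
--         node_ancestors.add(p)
--
--     ancestors[node] = node_ancestors
--     return node_ancestors
-- ===== SOURCE B (Python) =====
-- def dfs_ancestors(node, parents, ancestors):
--     # Bottom-up fixpoint (Kahn-style rounds) instead of A's top-down recursive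
--     # memoized DFS: repeatedly resolve every node whose parents are all cached.
--     # Caches more nodes than A does; the return value is identical.
--     if node in ancestors:
--         return ancestors[node]
--     changed = True
--     while changed and node not in ancestors:
--         changed = False
--         for n, ps in parents.items():
--             if n not in ancestors and all(p in ancestors for p in ps):
--                 s = {n}
--                 for p in ps:
--                     s |= ancestors[p]
--                     s.add(p)
--                 ancestors[n] = s
--                 changed = True
--     return ancestors[node]
-- ===== Notes on version B (the rewrite author's own statement) =====
-- stated objective: alternative
-- what changed: Replaces A's top-down recursive memoized DFS with an iterative bottom-up fixpoint (Kahn-style rounds) that repeatedly resolves every node whose parents are all cached until the queried node is cached; A's mutation of the shared cache differs (B may cache more nodes), the return value is identical.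
import Mathlib
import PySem

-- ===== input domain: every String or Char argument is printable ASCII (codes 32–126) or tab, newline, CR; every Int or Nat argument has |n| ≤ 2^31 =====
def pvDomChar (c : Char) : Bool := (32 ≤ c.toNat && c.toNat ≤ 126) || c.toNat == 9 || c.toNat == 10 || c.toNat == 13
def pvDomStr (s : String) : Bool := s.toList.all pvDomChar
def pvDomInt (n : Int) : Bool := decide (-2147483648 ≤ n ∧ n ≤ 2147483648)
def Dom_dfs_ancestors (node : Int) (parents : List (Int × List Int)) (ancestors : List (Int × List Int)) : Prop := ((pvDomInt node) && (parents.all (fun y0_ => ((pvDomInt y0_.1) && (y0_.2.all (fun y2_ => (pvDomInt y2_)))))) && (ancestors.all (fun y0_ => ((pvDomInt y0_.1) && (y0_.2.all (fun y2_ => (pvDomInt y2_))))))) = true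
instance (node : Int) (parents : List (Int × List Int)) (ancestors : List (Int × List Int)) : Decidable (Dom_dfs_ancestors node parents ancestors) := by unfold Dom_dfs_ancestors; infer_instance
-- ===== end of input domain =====

-- B replaces A's top-down recursive memoized DFS by a bottom-up fixpoint (Kahn-style
-- rounds); equal return value — side effects differ: A caches exactly the visited
-- nodes, B may cache every key whose parents are resolved (equivalence is about the
-- return value only).

-- ===== PORT A =====
-- A is a recursive DFS threading the mutated `ancestors` dict; the recursion is
-- depth-guarded by fuel (Python has no bound: on inputs where the fuel could run out
-- Python A raises RecursionError/KeyError, excluded by Pre_).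
mutual
def dfsA (parents : PySem.Dict Int (List Int)) : Nat → Int → PySem.Dict Int (List Int) → Option (List Int × PySem.Dict Int (List Int))
  | 0, _, _ => none
  | fuel+1, node, anc =>
    match PySem.Dict.get? anc node with
    | some v => some (v, anc)                       -- if node in ancestors: return ancestors[node]
    | none =>
      match PySem.Dict.get? parents node with
      | none => none                                -- KeyError: parents[node]
      | some ps =>
        match dfsAList parents fuel ps (PySem.Set.ofList [node]) anc with
        | none => none
        | some (s, anc') => some (s, PySem.Dict.insert anc' node s)   -- ancestors[node] = node_ancestors; return it
  termination_by fuel _ _ => (fuel, 0)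
-- the `for p in parents[node]` loop, threading (node_ancestors, ancestors)
def dfsAList (parents : PySem.Dict Int (List Int)) : Nat → List Int → PySem.Set Int → PySem.Dict Int (List Int) → Option (PySem.Set Int × PySem.Dict Int (List Int))
  | _, [], s, anc => some (s, anc)
  | fuel, p :: ps, s, anc =>
    match dfsA parents fuel p anc with
    | none => none
    | some (pa, anc') => dfsAList parents fuel ps (PySem.Set.add (PySem.Set.update s pa) p) anc'
  termination_by fuel ps _ => (fuel, ps.length + 1)
end

def dfs_ancestors (node : Int) (parents : List (Int × List Int)) (ancestors : List (Int × List Int)) : List Int :=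
  match dfsA (PySem.Dict.mk parents) (parents.length + 2) node (PySem.Dict.mk ancestors) with
  | some (v, _) => v
  | none => []                                      -- Python A raises here (outside Pre_)

-- ===== PORT B =====
-- s = {n}; for p in ps: s |= ancestors[p]; s.add(p)
def collectB (anc : PySem.Dict Int (List Int)) (n : Int) (ps : List Int) : List Int :=
  ps.foldl (fun s p => PySem.Set.add (PySem.Set.update s (PySem.Dict.getD anc p [])) p)
    (PySem.Set.ofList [n])

-- one pass of the inner `for n, ps in parents.items()` loop; state = (ancestors, changed)
def passB (items : List (Int × List Int)) (anc0 : PySem.Dict Int (List Int)) : PySem.Dict Int (List Int) × Bool :=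
  items.foldl
    (fun st np =>
      if !(PySem.Dict.contains st.1 np.1) && np.2.all (fun p => PySem.Dict.contains st.1 p)
      then (PySem.Dict.insert st.1 np.1 (collectB st.1 np.1 np.2), true)
      else st)
    (anc0, false)

-- the `while changed and node not in ancestors` loop; a changed pass caches at least
-- one fresh parents key, so parents.length + 1 iterations always reach the fixpoint
def loopB (node : Int) (items : List (Int × List Int)) : Nat → PySem.Dict Int (List Int) → PySem.Dict Int (List Int)
  | 0, anc => anc
  | c+1, anc =>
    if (PySem.Dict.get? anc node).isSome then anc
    else
      let r := passB items anc
      if r.2 then loopB node items c r.1 else r.1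

def dfs_ancestors_alt (node : Int) (parents : List (Int × List Int)) (ancestors : List (Int × List Int)) : List Int :=
  match PySem.Dict.get? (PySem.Dict.mk ancestors) node with
  | some v => v
  | none => PySem.Dict.getD (loopB node parents (parents.length + 1) (PySem.Dict.mk ancestors)) node []   -- Python B raises KeyError where the default [] fires (outside Pre_)

-- ===== PRECONDITION & SPEC =====
-- "grounded within k steps": cached, or a parents key all of whose parents are
-- grounded within k-1 — the well-founded domain of A's recursion.
def groundB (parents ancestors : List (Int × List Int)) : Nat → Int → Bool
  | 0, n => (PySem.Dict.get? (PySem.Dict.mk ancestors) n).isSome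
  | k+1, n => (PySem.Dict.get? (PySem.Dict.mk ancestors) n).isSome ||
      (match PySem.Dict.get? (PySem.Dict.mk parents) n with
       | some ps => ps.all (groundB parents ancestors k)
       | none => false)

-- Pre_ excludes exactly the inputs on which Python A raises (KeyError on an uncached
-- node missing from parents, RecursionError on a cyclic parent chain): node must be
-- grounded. Duplicate keys are excluded because the association lists stand for
-- Python dicts, which cannot carry duplicate keys.
def Pre_dfs_ancestors (node : Int) (parents : List (Int × List Int)) (ancestors : List (Int × List Int)) : Prop :=
  (parents.map Prod.fst).Nodup ∧ (ancestors.map Prod.fst).Nodup ∧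
  groundB parents ancestors (parents.length + 1) node = true

instance (node : Int) (parents : List (Int × List Int)) (ancestors : List (Int × List Int)) : Decidable (Pre_dfs_ancestors node parents ancestors) := by unfold Pre_dfs_ancestors; infer_instance

def pvWitness_dfs_ancestors : Int × (List (Int × List Int)) × (List (Int × List Int)) :=
  (1, [(1, [2]), (2, [])], [])

def Spec_dfs_ancestors (node : Int) (parents : List (Int × List Int)) (ancestors : List (Int × List Int)) (out : List Int) : Prop := out = dfs_ancestors_alt node parents ancestors
instance (node : Int) (parents : List (Int × List Int)) (ancestors : List (Int × List Int)) (out : List Int) : Decidable (Spec_dfs_ancestors node parents ancestors out) := by unfold Spec_dfs_ancestors; infer_instance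

-- ===== CLAIM (what is proved, stated in full; the proofs are below) =====
def Claim_equal_dfs_ancestors : Prop := ∀ (node : Int) (parents : List (Int × List Int)) (ancestors : List (Int × List Int)), Dom_dfs_ancestors node parents ancestors → Pre_dfs_ancestors node parents ancestors → Spec_dfs_ancestors node parents ancestors (dfs_ancestors node parents ancestors)

-- ===== LEMMAS AND PROOFS =====

-- the pure value of A's recursion: memoization only reuses values it would recompute,
-- so the returned set (as an ordered PySem.Set) only depends on parents and the
-- initial cache d0; valA is that value, fueled.
mutual
def valA (parents d0 : PySem.Dict Int (List Int)) : Nat → Int → Option (List Int)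
  | 0, _ => none
  | f+1, n =>
    match PySem.Dict.get? d0 n with
    | some v => some v
    | none =>
      match PySem.Dict.get? parents n with
      | none => none
      | some ps => valList parents d0 f ps (PySem.Set.ofList [n])
  termination_by f _ => (f, 0)
def valList (parents d0 : PySem.Dict Int (List Int)) : Nat → List Int → PySem.Set Int → Option (List Int)
  | _, [], s => some s
  | f, p :: ps, s =>
    match valA parents d0 f p with
    | none => none
    | some pa => valList parents d0 f ps (PySem.Set.add (PySem.Set.update s pa) p)
  termination_by f ps _ => (f, ps.length + 1)
end

theorem valList_mono_of {P D : PySem.Dict Int (List Int)} {f g : Nat}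
    (h : ∀ n v, valA P D f n = some v → valA P D g n = some v) :
    ∀ ps s v, valList P D f ps s = some v → valList P D g ps s = some v := by
  intro ps
  induction ps with
  | nil => intro s v hv; simpa [valList] using hv
  | cons p ps ih =>
    intro s v hv
    cases hp : valA P D f p with
    | none => rw [valList, hp] at hv; exact absurd hv (by simp)
    | some pa =>
      rw [valList, hp] at hv
      rw [valList, h p pa hp]
      exact ih _ _ hv

theorem valA_mono {P D : PySem.Dict Int (List Int)} :
    ∀ f g, f ≤ g → ∀ n v, valA P D f n = some v → valA P D g n = some v := by
  intro f
  induction f with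
  | zero => intro g _ n v hv; rw [valA] at hv; exact absurd hv (by simp)
  | succ f ih =>
    intro g hfg n v hv
    cases g with
    | zero => omega
    | succ g' =>
      rw [valA] at hv ⊢
      cases hd : PySem.Dict.get? D n with
      | some w => rw [hd] at hv; exact hv
      | none =>
        rw [hd] at hv
        cases hp : PySem.Dict.get? P n with
        | none => rw [hp] at hv; exact absurd hv (by simp)
        | some ps =>
          rw [hp] at hv
          exact valList_mono_of (fun n v => ih g' (by omega) n v) _ _ _ hv

theorem valA_det {P D : PySem.Dict Int (List Int)} {f g : Nat} {n : Int} {v w : List Int}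
    (hf : valA P D f n = some v) (hg : valA P D g n = some w) : v = w := by
  rcases Nat.le_total f g with h | h
  · have := valA_mono f g h n v hf
    rw [this] at hg; exact Option.some.inj hg
  · have := valA_mono g f h n w hg
    rw [this] at hf; exact (Option.some.inj hf).symm

-- the memo invariant: every cache entry carries the pure value, and the cache extends d0
def goodD (P D anc : PySem.Dict Int (List Int)) : Prop :=
  (∀ k v, PySem.Dict.get? anc k = some v → ∃ f, valA P D f k = some v) ∧
  (∀ k, PySem.Dict.get? anc k = none → PySem.Dict.get? D k = none)

theorem goodD_insert {P D anc : PySem.Dict Int (List Int)} {n : Int} {v : List Int}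
    (h : goodD P D anc) (hv : ∃ f, valA P D f n = some v) :
    goodD P D (PySem.Dict.insert anc n v) := by
  constructor
  · intro k w hk
    by_cases hkn : k = n
    · subst hkn
      rw [PySem.Dict.get?_insert_self] at hk
      cases hk; exact hv
    · rw [PySem.Dict.get?_insert_of_ne _ _ hkn] at hk
      exact h.1 k w hk
  · intro k hk
    by_cases hkn : k = n
    · subst hkn
      rw [PySem.Dict.get?_insert_self] at hk
      exact absurd hk (by simp)
    · rw [PySem.Dict.get?_insert_of_ne _ _ hkn] at hk
      exact h.2 k hk

theorem dfsAList_of {P D : PySem.Dict Int (List Int)} {f : Nat}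
    (h : ∀ n anc v, goodD P D anc → valA P D f n = some v →
      ∃ anc', dfsA P f n anc = some (v, anc') ∧ goodD P D anc') :
    ∀ ps s anc v, goodD P D anc → valList P D f ps s = some v →
      ∃ anc', dfsAList P f ps s anc = some (v, anc') ∧ goodD P D anc' := by
  intro ps
  induction ps with
  | nil =>
    intro s anc v hgood hv
    rw [valList] at hv
    obtain rfl : s = v := Option.some.inj hv
    exact ⟨anc, by rw [dfsAList], hgood⟩
  | cons p ps ih =>
    intro s anc v hgood hv
    cases hp : valA P D f p with
    | none => rw [valList, hp] at hv; exact absurd hv (by simp)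
    | some pa =>
      rw [valList, hp] at hv
      obtain ⟨anc1, hrun, hg1⟩ := h p anc pa hgood hp
      obtain ⟨anc2, hrun2, hg2⟩ := ih _ anc1 v hg1 hv
      exact ⟨anc2, by rw [dfsAList, hrun]; exact hrun2, hg2⟩

theorem dfsA_val {P D : PySem.Dict Int (List Int)} :
    ∀ f n anc v, goodD P D anc → valA P D f n = some v →
      ∃ anc', dfsA P f n anc = some (v, anc') ∧ goodD P D anc' := by
  intro f
  induction f with
  | zero => intro n anc v _ hv; rw [valA] at hv; exact absurd hv (by simp)
  | succ f ih =>
    intro n anc v hgood hv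
    cases ha : PySem.Dict.get? anc n with
    | some w =>
      obtain ⟨f0, hf0⟩ := hgood.1 n w ha
      have hvw : v = w := valA_det hv hf0
      subst hvw
      exact ⟨anc, by rw [dfsA, ha], hgood⟩
    | none =>
      have hd0 := hgood.2 n ha
      rw [valA, hd0] at hv
      cases hp : PySem.Dict.get? P n with
      | none => rw [hp] at hv; exact absurd hv (by simp)
      | some ps =>
        rw [hp] at hv
        obtain ⟨anc', hrun, hg'⟩ := dfsAList_of (fun m a w hg hw => ih m a w hg hw) ps _ anc v hgood hv
        refine ⟨PySem.Dict.insert anc' n v, ?_, goodD_insert hg' ⟨f + 1, by rw [valA, hd0, hp]; exact hv⟩⟩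
        rw [dfsA, ha, hp]
        show (match dfsAList P f ps (PySem.Set.ofList [n]) anc with
              | none => none
              | some (s, anc') => some (s, PySem.Dict.insert anc' n s)) = _
        rw [hrun]

-- groundedness gives the pure value enough fuel
theorem ground_val {parents ancestors : List (Int × List Int)} :
    ∀ k n, groundB parents ancestors k n = true →
      ∃ v, valA (PySem.Dict.mk parents) (PySem.Dict.mk ancestors) (k+1) n = some v := by
  intro k
  induction k with
  | zero =>
    intro n h
    rw [groundB] at h
    obtain ⟨v, hv⟩ := Option.isSome_iff_exists.mp h
    exact ⟨v, by rw [valA, hv]⟩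
  | succ k ih =>
    intro n h
    cases hd : PySem.Dict.get? (PySem.Dict.mk ancestors) n with
    | some v => exact ⟨v, by rw [valA, hd]⟩
    | none =>
      rw [groundB, hd] at h
      simp only [Option.isSome_none, Bool.false_or] at h
      cases hp : PySem.Dict.get? (PySem.Dict.mk parents) n with
      | none => rw [hp] at h; exact absurd h (by simp)
      | some ps =>
        rw [hp] at h
        have hlist : ∀ ps', ps'.all (groundB parents ancestors k) = true →
            ∀ s, ∃ w, valList (PySem.Dict.mk parents) (PySem.Dict.mk ancestors) (k+1) ps' s = some w := by
          intro ps'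
          induction ps' with
          | nil => intro _ s; exact ⟨s, by rw [valList]⟩
          | cons p ps' ihl =>
            intro hall s
            rw [List.all_cons, Bool.and_eq_true] at hall
            obtain ⟨w, hw⟩ := ih p hall.1
            obtain ⟨w', hw'⟩ := ihl hall.2 (PySem.Set.add (PySem.Set.update s w) p)
            exact ⟨w', by rw [valList, hw]; exact hw'⟩
        obtain ⟨w, hw⟩ := hlist ps h (PySem.Set.ofList [n])
        exact ⟨w, by rw [valA, hd, hp]; exact hw⟩

-- ===== B-side lemmas =====

-- proof-side name for passB's fold step (definitionally equal to the inline lambda)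
def pstep (st : PySem.Dict Int (List Int) × Bool) (np : Int × List Int) : PySem.Dict Int (List Int) × Bool :=
  if !(PySem.Dict.contains st.1 np.1) && np.2.all (fun p => PySem.Dict.contains st.1 p)
  then (PySem.Dict.insert st.1 np.1 (collectB st.1 np.1 np.2), true)
  else st

theorem passB_eq (items : List (Int × List Int)) (anc : PySem.Dict Int (List Int)) :
    passB items anc = items.foldl pstep (anc, false) := rfl

theorem passB_mono :
    ∀ (items : List (Int × List Int)) (st : PySem.Dict Int (List Int) × Bool) (k : Int) (v : List Int),
      PySem.Dict.get? st.1 k = some v →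
      PySem.Dict.get? (items.foldl pstep st).1 k = some v := by
  intro items
  induction items with
  | nil => intro st k v h; simpa using h
  | cons np items ih =>
    intro st k v h
    rw [List.foldl_cons]
    apply ih
    rw [pstep]
    by_cases hc : (!(PySem.Dict.contains st.1 np.1) && np.2.all (fun p => PySem.Dict.contains st.1 p)) = true
    · rw [if_pos hc]
      by_cases hk : k = np.1
      · rw [Bool.and_eq_true, Bool.not_eq_true'] at hc
        have hnone := (PySem.Dict.get?_eq_none_iff_contains st.1 np.1).mpr hc.1
        rw [hk, hnone] at h
        cases h
      · rw [PySem.Dict.get?_insert_of_ne _ _ hk]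
        exact h
    · rw [if_neg hc]; exact h

theorem passB_isSome {items : List (Int × List Int)} {st : PySem.Dict Int (List Int) × Bool} {k : Int}
    (h : (PySem.Dict.get? st.1 k).isSome) :
    (PySem.Dict.get? (items.foldl pstep st).1 k).isSome := by
  obtain ⟨v, hv⟩ := Option.isSome_iff_exists.mp h
  rw [passB_mono items st k v hv]
  rfl

theorem passB_flag :
    ∀ (items : List (Int × List Int)) (st : PySem.Dict Int (List Int) × Bool), st.2 = true →
      (items.foldl pstep st).2 = true := by
  intro items
  induction items with
  | nil => intro st h; simpa using h
  | cons np items ih =>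
    intro st h
    rw [List.foldl_cons]
    apply ih
    rw [pstep]
    by_cases hc : (!(PySem.Dict.contains st.1 np.1) && np.2.all (fun p => PySem.Dict.contains st.1 p)) = true
    · rw [if_pos hc]
    · rw [if_neg hc]; exact h

theorem passB_unchanged :
    ∀ (items : List (Int × List Int)) (st : PySem.Dict Int (List Int) × Bool),
      (items.foldl pstep st).2 = false → items.foldl pstep st = st := by
  intro items
  induction items with
  | nil => intro st _; rfl
  | cons np items ih =>
    intro st h
    rw [List.foldl_cons] at h ⊢
    by_cases hc : (!(PySem.Dict.contains st.1 np.1) && np.2.all (fun p => PySem.Dict.contains st.1 p)) = true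
    · exfalso
      have hfl : (pstep st np).2 = true := by rw [pstep, if_pos hc]
      have := passB_flag items _ hfl
      rw [this] at h
      cases h
    · have hst : pstep st np = st := by rw [pstep, if_neg hc]
      rw [hst] at h ⊢
      exact ih st h

-- a uniform fuel for a list of cached parents
theorem uniform_fuel {P D anc : PySem.Dict Int (List Int)} (hg : goodD P D anc) :
    ∀ ps : List Int, (∀ p ∈ ps, (PySem.Dict.get? anc p).isSome) →
      ∃ F, ∀ p ∈ ps, valA P D F p = some (PySem.Dict.getD anc p []) := by
  intro ps
  induction ps with
  | nil => intro _; exact ⟨0, by simp⟩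
  | cons p ps ih =>
    intro hall
    obtain ⟨w, hw⟩ := Option.isSome_iff_exists.mp (hall p (by simp))
    obtain ⟨f0, hf0⟩ := hg.1 p w hw
    obtain ⟨F, hF⟩ := ih (fun q hq => hall q (List.mem_cons_of_mem _ hq))
    refine ⟨max f0 F, ?_⟩
    intro q hq
    rcases List.mem_cons.mp hq with rfl | hq
    · have hd : PySem.Dict.getD anc q [] = w := by rw [PySem.Dict.getD, hw]; rfl
      rw [hd]
      exact valA_mono f0 _ (Nat.le_max_left _ _) _ _ hf0
    · exact valA_mono F _ (Nat.le_max_right _ _) _ _ (hF q hq)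

theorem collect_val {P D anc : PySem.Dict Int (List Int)} {F : Nat} :
    ∀ ps s, (∀ p ∈ ps, valA P D F p = some (PySem.Dict.getD anc p [])) →
      valList P D F ps s =
        some (ps.foldl (fun s p => PySem.Set.add (PySem.Set.update s (PySem.Dict.getD anc p [])) p) s) := by
  intro ps
  induction ps with
  | nil => intro s _; rw [valList, List.foldl_nil]
  | cons p ps ih =>
    intro s hall
    rw [valList, hall p (by simp), List.foldl_cons]
    exact ih _ (fun q hq => hall q (List.mem_cons_of_mem _ hq))

theorem passB_good {P D : PySem.Dict Int (List Int)} :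
    ∀ items : List (Int × List Int), (∀ np ∈ items, PySem.Dict.get? P np.1 = some np.2) →
      ∀ st : PySem.Dict Int (List Int) × Bool, goodD P D st.1 →
        goodD P D ((items.foldl pstep st).1) := by
  intro items
  induction items with
  | nil => intro _ st hst; simpa using hst
  | cons np items ih =>
    intro hitems st hst
    rw [List.foldl_cons]
    apply ih (fun q hq => hitems q (List.mem_cons_of_mem _ hq))
    rw [pstep]
    by_cases hc : (!(PySem.Dict.contains st.1 np.1) && np.2.all (fun p => PySem.Dict.contains st.1 p)) = true
    · rw [if_pos hc]
      rw [Bool.and_eq_true, Bool.not_eq_true'] at hc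
      have hnone : PySem.Dict.get? st.1 np.1 = none :=
        (PySem.Dict.get?_eq_none_iff_contains st.1 np.1).mpr hc.1
      have hd0 : PySem.Dict.get? D np.1 = none := hst.2 _ hnone
      have hall : ∀ p ∈ np.2, (PySem.Dict.get? st.1 p).isSome := by
        intro p hp
        have hcp := List.all_eq_true.mp hc.2 p hp
        rcases h' : PySem.Dict.get? st.1 p with _ | w
        · rw [PySem.Dict.get?_eq_none_iff_contains] at h'
          rw [hcp] at h'
          cases h'
        · rfl
      obtain ⟨F, hF⟩ := uniform_fuel hst np.2 hall
      have hval : valA P D (F+1) np.1 = some (collectB st.1 np.1 np.2) := by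
        rw [valA, hd0, hitems np (by simp)]
        exact collect_val np.2 _ hF
      exact goodD_insert hst ⟨F+1, hval⟩
    · rw [if_neg hc]; exact hst

theorem passB_hit {m : Int} {ps : List Int} :
    ∀ (items : List (Int × List Int)) (st : PySem.Dict Int (List Int) × Bool),
      (m, ps) ∈ items → (∀ p ∈ ps, (PySem.Dict.get? st.1 p).isSome) →
      (PySem.Dict.get? (items.foldl pstep st).1 m).isSome := by
  intro items
  induction items with
  | nil => intro st hmem _; cases hmem
  | cons np items ih =>
    intro st hmem hps
    rw [List.foldl_cons]
    rcases List.mem_cons.mp hmem with rfl | hmem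
    · -- head is (m, ps)
      by_cases hcm : PySem.Dict.contains st.1 m = true
      · have hsome : (PySem.Dict.get? st.1 m).isSome := by
          rcases h' : PySem.Dict.get? st.1 m with _ | w
          · rw [PySem.Dict.get?_eq_none_iff_contains] at h'
            rw [hcm] at h'
            cases h'
          · rfl
        have hstep : (PySem.Dict.get? (pstep st (m, ps)).1 m).isSome := by
          rw [pstep]
          by_cases hc : (!(PySem.Dict.contains st.1 m) && ps.all (fun p => PySem.Dict.contains st.1 p)) = true
          · rw [if_pos hc]
            rw [PySem.Dict.get?_insert_self]
            rfl
          · rw [if_neg hc]; exact hsome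
        exact passB_isSome hstep
      · have hcond : (!(PySem.Dict.contains st.1 m) && ps.all (fun p => PySem.Dict.contains st.1 p)) = true := by
          rw [Bool.and_eq_true, Bool.not_eq_true']
          refine ⟨by simpa using hcm, List.all_eq_true.mpr ?_⟩
          intro p hp
          have := hps p hp
          rcases h' : PySem.Dict.get? st.1 p with _ | w
          · rw [h'] at this; cases this
          · rcases h'' : PySem.Dict.contains st.1 p with _ | _
            · rw [(PySem.Dict.get?_eq_none_iff_contains st.1 p).mpr h''] at h'
              cases h'
            · rfl
        have hstep : (PySem.Dict.get? (pstep st (m, ps)).1 m).isSome := by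
          rw [pstep, if_pos hcond, PySem.Dict.get?_insert_self]
          rfl
        exact passB_isSome hstep
    · -- (m, ps) in the tail
      apply ih _ hmem
      intro p hp
      have := hps p hp
      obtain ⟨w, hw⟩ := Option.isSome_iff_exists.mp this
      have := passB_mono [np] st p w hw
      rw [List.foldl_cons, List.foldl_nil] at this
      rw [this]
      rfl

theorem get?_mk_mem {l : List (Int × List Int)} {m : Int} {ps : List Int}
    (h : PySem.Dict.get? (PySem.Dict.mk l) m = some ps) : (m, ps) ∈ l := by
  rw [PySem.Dict.get?] at h
  obtain ⟨q, hq, hq2⟩ := Option.map_eq_some_iff.mp h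
  have hqmem : q ∈ l := List.mem_of_find?_eq_some hq
  have hqpred := List.find?_some hq
  obtain ⟨q1, q2⟩ := q
  have h1 : q1 = m := by simpa using hqpred
  have h2 : q2 = ps := hq2
  rw [h1, h2] at hqmem
  exact hqmem

def cachedAll (parents ancestors : List (Int × List Int)) (j : Nat) (anc : PySem.Dict Int (List Int)) : Prop :=
  ∀ m, groundB parents ancestors j m = true → (PySem.Dict.get? anc m).isSome

theorem passB_progress {parents ancestors : List (Int × List Int)} {j : Nat}
    {anc : PySem.Dict Int (List Int)}
    (hgood : goodD (PySem.Dict.mk parents) (PySem.Dict.mk ancestors) anc)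
    (hc : cachedAll parents ancestors j anc) :
    cachedAll parents ancestors (j+1) ((parents.foldl pstep (anc, false)).1) := by
  intro m hm
  rw [groundB] at hm
  cases hd : PySem.Dict.get? (PySem.Dict.mk ancestors) m with
  | some w =>
    have hsome : (PySem.Dict.get? anc m).isSome := by
      rcases h' : PySem.Dict.get? anc m with _ | w'
      · rw [hgood.2 m h'] at hd; cases hd
      · rfl
    exact passB_isSome hsome
  | none =>
    rw [hd] at hm
    simp only [Option.isSome_none, Bool.false_or] at hm
    cases hp : PySem.Dict.get? (PySem.Dict.mk parents) m with
    | none => rw [hp] at hm; cases hm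
    | some ps =>
      rw [hp] at hm
      have hmem : (m, ps) ∈ parents := get?_mk_mem hp
      exact passB_hit parents (anc, false) hmem
        (fun p hp' => hc p (List.all_eq_true.mp hm p hp'))

theorem loopB_spec {parents ancestors : List (Int × List Int)} {node : Int}
    (hnd : (parents.map Prod.fst).Nodup) :
    ∀ c j anc, goodD (PySem.Dict.mk parents) (PySem.Dict.mk ancestors) anc →
      cachedAll parents ancestors j anc →
      groundB parents ancestors (j + c) node = true →
      (PySem.Dict.get? (loopB node parents c anc) node).isSome ∧
      goodD (PySem.Dict.mk parents) (PySem.Dict.mk ancestors) (loopB node parents c anc) := by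
  have hitems : ∀ np ∈ parents, PySem.Dict.get? (PySem.Dict.mk parents) np.1 = some np.2 := by
    intro np hnp
    exact PySem.Dict.get?_of_mem_items (d := PySem.Dict.mk parents)
      (by exact hnp) (by simpa [PySem.Dict.keys] using hnd)
  intro c
  induction c with
  | zero =>
    intro j anc hgood hc hg
    rw [loopB]
    exact ⟨hc node hg, hgood⟩
  | succ c ih =>
    intro j anc hgood hc hg
    rw [loopB]
    by_cases hn : (PySem.Dict.get? anc node).isSome = true
    · rw [if_pos hn]; exact ⟨hn, hgood⟩
    · rw [if_neg hn]
      show (PySem.Dict.get? (if (passB parents anc).2 then loopB node parents c (passB parents anc).1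
            else (passB parents anc).1) node).isSome ∧ _
      have hgood' : goodD (PySem.Dict.mk parents) (PySem.Dict.mk ancestors) ((passB parents anc).1) := by
        rw [passB_eq]; exact passB_good parents hitems (anc, false) hgood
      have hc' : cachedAll parents ancestors (j+1) ((passB parents anc).1) := by
        rw [passB_eq]; exact passB_progress hgood hc
      by_cases hr : (passB parents anc).2 = true
      · rw [if_pos hr]
        apply ih (j+1) _ hgood' hc'
        have : j + 1 + c = j + (c + 1) := by omega
        rw [this]
        exact hg
      · rw [if_neg hr]
        have hunch : passB parents anc = (anc, false) := by
          rw [passB_eq] at hr ⊢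
          exact passB_unchanged parents (anc, false) (by simpa using hr)
        rw [hunch]
        have hiter : ∀ i, cachedAll parents ancestors (j + i) anc := by
          intro i
          induction i with
          | zero => simpa using hc
          | succ i ihi =>
            have hstep := passB_progress hgood ihi
            have : (parents.foldl pstep (anc, false)).1 = anc := by
              rw [← passB_eq, hunch]
            rw [this] at hstep
            intro m hm
            exact hstep m (by rw [Nat.add_succ] at hm; exact hm)
        exact ⟨hiter (c + 1) node hg, hgood⟩

theorem goodD_init {parents ancestors : List (Int × List Int)} :
    goodD (PySem.Dict.mk parents) (PySem.Dict.mk ancestors) (PySem.Dict.mk ancestors) := by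
  constructor
  · intro k v h
    exact ⟨1, by rw [valA, h]⟩
  · intro k h
    exact h

-- ===== VERDICT (by name: the statement is the Claim_ definition above) =====
theorem dfs_ancestors_spec : Claim_equal_dfs_ancestors := by
  intro node parents ancestors _ hpre
  obtain ⟨hndp, hnda, hg⟩ := hpre
  unfold Spec_dfs_ancestors
  obtain ⟨v, hval⟩ := ground_val (parents := parents) (ancestors := ancestors) _ node hg
  obtain ⟨anc', hrun, _⟩ := dfsA_val _ node (PySem.Dict.mk ancestors) v goodD_init hval
  have hA : dfs_ancestors node parents ancestors = v := by
    rw [dfs_ancestors]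
    have : parents.length + 2 = parents.length + 1 + 1 := by omega
    rw [this, hrun]
  rw [hA, dfs_ancestors_alt]
  cases hd : PySem.Dict.get? (PySem.Dict.mk ancestors) node with
  | some w =>
    have hw : valA (PySem.Dict.mk parents) (PySem.Dict.mk ancestors) 1 node = some w := by
      rw [valA, hd]
    exact valA_det hval hw
  | none =>
    obtain ⟨hsome, hgoodf⟩ := loopB_spec hndp (parents.length + 1) 0 (PySem.Dict.mk ancestors)
      goodD_init (fun m hm => by rw [groundB] at hm; exact hm) (by simpa using hg)
    obtain ⟨w, hw⟩ := Option.isSome_iff_exists.mp hsome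
    obtain ⟨f, hfw⟩ := hgoodf.1 node w hw
    rw [PySem.Dict.getD, hw]
    exact valA_det hval hfw
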